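-- pv_equiv track=rewrite | github.com/Ben-Hardy/advent_of_code | 2021/day10/day10.py | parse_brackets
-- ===== SOURCE A (Python) =====
-- def parse_brackets(s: str) -> str:
-- 	if not s:
-- 		return 'complete'
--
-- 	bracket_list = list(s)
-- 	open_stack = []
--
-- 	opens = ['(', '[', '{', '<']
-- 	closes = [')', ']', '}', '>']
-- 	open_stack.append(bracket_list.pop(0))
-- 	# cover the case where the first element is a closing bracket
-- 	if open_stack[0] in closes:
-- 		return open_stack[0]
-- 	else:
-- 		while open_stack and bracket_list:
-- 			cur = bracket_list.pop(0)
-- 			if cur in opens: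
-- 				open_stack.append(cur)
-- 			elif cur in closes:
-- 				bracket_type = closes.index(cur)
-- 				if opens[bracket_type] == open_stack[-1]:
-- 					open_stack.pop(-1)
-- 				else:
-- 					return cur
--
-- 		# there were more closed brackets than opens or more opens than closes
-- 		if (open_stack and not bracket_list) or ((not open_stack) and bracket_list):
-- 			return 'incomplete'
-- 		else:
-- 			return 'complete'
-- ===== SOURCE B (Python) =====
-- def parse_brackets(s: str) -> str:
--     if not s:
--         return 'complete'
--     pairs = {')': '(', ']': '[', '}': '{', '>': '<'}
--     first = s[0]
--     if first in pairs:
--         return first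
--     stack = [first]
--     i = 1
--     n = len(s)
--     while stack and i < n:
--         c = s[i]
--         i += 1
--         if c in '([{<':
--             stack.append(c)
--         elif c in pairs:
--             if pairs[c] == stack[-1]:
--                 stack.pop()
--             else:
--                 return c
--     return 'complete' if (not stack and i == n) else 'incomplete'
-- ===== Notes on version B (the rewrite author's own statement) =====
-- stated objective: faster
-- what changed: Replaced A's repeated list.pop(0) on a materialized char list (each pop shifts the whole tail) by a single forward index scan with a dict of matching pairs and an end-appended stack, keeping A's exact exit conditions (including returning 'incomplete' when the stack empties before the string ends).
import Mathlib
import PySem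

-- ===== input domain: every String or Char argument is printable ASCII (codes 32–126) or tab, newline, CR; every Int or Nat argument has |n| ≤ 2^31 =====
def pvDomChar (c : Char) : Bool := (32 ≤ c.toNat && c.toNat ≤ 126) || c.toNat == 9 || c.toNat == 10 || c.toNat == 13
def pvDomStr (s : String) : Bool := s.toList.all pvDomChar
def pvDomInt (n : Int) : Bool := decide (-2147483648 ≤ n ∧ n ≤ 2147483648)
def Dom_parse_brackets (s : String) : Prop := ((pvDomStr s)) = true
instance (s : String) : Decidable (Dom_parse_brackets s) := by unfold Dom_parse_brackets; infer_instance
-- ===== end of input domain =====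

-- B replaces A's repeated list.pop(0) (O(n^2)) by a single forward scan with an index and a
-- stack (O(n)); equivalence of the RETURN value is proved (neither program mutates its argument).

-- ===== PORT A =====
def pvOpens : List Char := ['(', '[', '{', '<']
def pvCloses : List Char := [')', ']', '}', '>']

-- the while-loop of A: state = (open_stack, bracket_list); exit conditions as in A's final `if`
def parse_bracketsLoop (stack : List Char) (rest : List Char) : String :=
  match rest with
  | [] => if !stack.isEmpty then "incomplete" else "complete"
  | cur :: rest' =>
    if stack.isEmpty then "incomplete"   -- loop exits with bracket_list nonempty
    else
      if cur ∈ pvOpens then parse_bracketsLoop (stack ++ [cur]) rest'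
      else if cur ∈ pvCloses then
        -- bracket_type = closes.index(cur) (always found: cur ∈ closes), opens[bracket_type], open_stack[-1]
        if PySem.List.pyGetD pvOpens (((PySem.List.index? pvCloses cur).getD 0 : Nat) : Int) ' '
             = PySem.List.pyGetD stack (-1) ' ' then
          parse_bracketsLoop stack.dropLast rest'
        else String.ofList [cur]
      else parse_bracketsLoop stack rest'

def parse_brackets (s : String) : String :=
  match s.toList with
  | [] => "complete"                      -- `if not s: return 'complete'`
  | first :: rest =>                      -- open_stack.append(bracket_list.pop(0))
    if first ∈ pvCloses then String.ofList [first]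
    else parse_bracketsLoop [first] rest

-- ===== PORT B =====
def pvPairs : PySem.Dict Char Char :=
  PySem.Dict.ofList [(')', '('), (']', '['), ('}', '{'), ('>', '<')]

-- the while-loop of B: state = (stack, remaining chars from index i); stack top at the head
def parse_bracketsLoopB (stack : List Char) (rest : List Char) : String :=
  match stack, rest with
  | [], rest => if rest.isEmpty then "complete" else "incomplete"  -- combined final return
  | _ :: _, [] => "incomplete"
  | top :: stk, c :: rest' =>
    if c ∈ ['(', '[', '{', '<'] then parse_bracketsLoopB (c :: top :: stk) rest'
    else
      match PySem.Dict.get? pvPairs c with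
      | some op => if op = top then parse_bracketsLoopB stk rest' else String.ofList [c]
      | none => parse_bracketsLoopB (top :: stk) rest'

def parse_brackets_alt (s : String) : String :=
  match s.toList with
  | [] => "complete"
  | first :: rest =>
    if (PySem.Dict.get? pvPairs first).isSome then String.ofList [first]
    else parse_bracketsLoopB [first] rest

-- ===== PRECONDITION & SPEC =====
def Spec_parse_brackets (s : String) (out : String) : Prop := out = parse_brackets_alt s
instance (s : String) (out : String) : Decidable (Spec_parse_brackets s out) := by unfold Spec_parse_brackets; infer_instance

-- ===== CLAIM (what is proved, stated in full; the proofs are below) =====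
def Claim_equal_parse_brackets : Prop := ∀ (s : String), Dom_parse_brackets s → Spec_parse_brackets s (parse_brackets s)

-- ===== LEMMAS AND PROOFS =====

theorem pvPairs_none_of_not_close {c : Char} (h : c ∉ pvCloses) :
    PySem.Dict.get? pvPairs c = none := by
  simp only [pvCloses, List.mem_cons, List.not_mem_nil, or_false, not_or] at h
  obtain ⟨h1, h2, h3, h4⟩ := h
  rw [show pvPairs = PySem.Dict.mk [(')', '('), (']', '['), ('}', '{'), ('>', '<')] from rfl]
  simp [PySem.Dict.get?, Ne.symm h1, Ne.symm h2, Ne.symm h3, Ne.symm h4]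

-- for a closing bracket, A's opens[closes.index(cur)] is exactly B's pairs[cur]
theorem close_pair {cur : Char} (hc : cur ∈ pvCloses) :
    PySem.Dict.get? pvPairs cur =
      some (PySem.List.pyGetD pvOpens (((PySem.List.index? pvCloses cur).getD 0 : Nat) : Int) ' ') := by
  fin_cases hc <;> decide

-- the two loops agree when A's stack is B's stack reversed
theorem loop_eq : ∀ (rest rstack : List Char),
    parse_bracketsLoop rstack.reverse rest = parse_bracketsLoopB rstack rest := by
  intro rest
  induction rest with
  | nil =>
    intro rstack
    cases rstack <;> simp [parse_bracketsLoop, parse_bracketsLoopB]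
  | cons cur rest' ih =>
    intro rstack
    cases rstack with
    | nil => simp [parse_bracketsLoop, parse_bracketsLoopB]
    | cons top stk =>
      simp only [parse_bracketsLoop, parse_bracketsLoopB, List.reverse_cons]
      rw [if_neg (by simp)]
      by_cases ho : cur ∈ pvOpens
      · have ho' : cur ∈ (['(', '[', '{', '<'] : List Char) := ho
        rw [if_pos ho, if_pos ho',
          show stk.reverse ++ [top] ++ [cur] = (cur :: top :: stk).reverse by simp, ih]
      · have ho' : cur ∉ (['(', '[', '{', '<'] : List Char) := ho
        rw [if_neg ho, if_neg ho']
        by_cases hc : cur ∈ pvCloses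
        · rw [if_pos hc, close_pair hc,
            PySem.List.pyGetD_neg_one_append_singleton]
          show _ = if _ = top then parse_bracketsLoopB stk rest' else String.ofList [cur]
          split_ifs with h
          · rw [show (stk.reverse ++ [top]).dropLast = stk.reverse by simp, ih]
          · rfl
        · rw [if_neg hc, pvPairs_none_of_not_close hc]
          show _ = parse_bracketsLoopB (top :: stk) rest'
          rw [show stk.reverse ++ [top] = (top :: stk).reverse by simp, ih]

-- ===== VERDICT (by name: the statement is the Claim_ definition above) =====
theorem parse_brackets_spec : Claim_equal_parse_brackets := by
  intro s _
  unfold Spec_parse_brackets parse_brackets parse_brackets_alt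
  cases h : s.toList with
  | nil => rfl
  | cons first rest =>
    simp only []
    by_cases hc : first ∈ pvCloses
    · have hs : (PySem.Dict.get? pvPairs first).isSome := by rw [close_pair hc]; rfl
      simp [hc, hs]
    · have hn : (PySem.Dict.get? pvPairs first).isSome = false := by
        rw [pvPairs_none_of_not_close hc]; rfl
      simp only [hc, hn, if_false, Bool.false_eq_true]
      simpa using loop_eq rest [first]
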